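-- pv_equiv track=rewrite | github.com/lVoidi/Tutorias-ce1101 | Examen/vectores.py | multiplicar_posicion
-- ===== SOURCE A (Python) =====
-- def multiplicar_posicion(v: list) -> list:
--     result = []
--     for i in range(len(v)):
--         if i % 2 == 0:
--             result.append(v[i] * 2)
--         else:
--             result.append(v[i] * 3)
--     return result
-- ===== SOURCE B (Python) =====
-- def multiplicar_posicion(v: list) -> list:
--     result = []
--     n = len(v)
--     i = 0
--     while i + 1 < n:
--         result.append(v[i] * 2)
--         result.append(v[i + 1] * 3)
--         i += 2
--     if i < n:
--         result.append(v[i] * 2)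
--     return result
-- ===== Notes on version B (the rewrite author's own statement) =====
-- stated objective: alternative
-- what changed: Replaced the per-index parity branch inside the loop by a stride-2 loop that appends an unconditional (x*2, y*3) pair each iteration and handles a trailing element after the loop.
import Mathlib
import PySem

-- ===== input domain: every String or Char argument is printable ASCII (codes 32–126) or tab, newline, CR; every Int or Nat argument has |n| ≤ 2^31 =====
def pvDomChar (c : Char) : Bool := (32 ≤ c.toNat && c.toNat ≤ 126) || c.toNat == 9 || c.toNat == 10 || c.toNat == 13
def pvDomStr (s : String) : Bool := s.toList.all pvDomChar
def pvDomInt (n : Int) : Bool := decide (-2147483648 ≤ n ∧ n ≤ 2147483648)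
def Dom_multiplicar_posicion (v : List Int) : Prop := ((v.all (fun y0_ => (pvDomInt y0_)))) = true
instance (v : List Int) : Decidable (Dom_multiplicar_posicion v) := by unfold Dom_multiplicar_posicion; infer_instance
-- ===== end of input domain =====

-- B replaces A's index loop with a parity branch by a pairwise structural recursion (alternative decomposition, same cost).

-- ===== PORT A =====
def multiplicar_posicion (v : List Int) : List Int :=
  (PySem.List.pyRange 0 (v.length : Int) 1).foldl
    (fun result i =>
      if PySem.Int.mod i 2 = 0 then result ++ [PySem.List.pyGetD v i 0 * 2]
      else result ++ [PySem.List.pyGetD v i 0 * 3]) []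

-- ===== PORT B =====
-- while i + 1 < n: append v[i]*2, v[i+1]*3; i += 2   (then the trailing element, if any)
def multiplicar_posicion_alt_go (v : List Int) (i : Nat) (result : List Int) : List Int :=
  if i + 1 < v.length then
    multiplicar_posicion_alt_go v (i + 2)
      (result ++ [PySem.List.pyGetD v (i : Int) 0 * 2, PySem.List.pyGetD v ((i : Nat) + 1 : Int) 0 * 3])
  else if i < v.length then result ++ [PySem.List.pyGetD v (i : Int) 0 * 2]
  else result
termination_by v.length - i

def multiplicar_posicion_alt (v : List Int) : List Int :=
  multiplicar_posicion_alt_go v 0 []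

-- ===== PRECONDITION & SPEC =====
def Spec_multiplicar_posicion (v : List Int) (out : List Int) : Prop := out = multiplicar_posicion_alt v
instance (v : List Int) (out : List Int) : Decidable (Spec_multiplicar_posicion v out) := by unfold Spec_multiplicar_posicion; infer_instance

-- ===== CLAIM (what is proved, stated in full; the proofs are below) =====
def Claim_equal_multiplicar_posicion : Prop := ∀ (v : List Int), Dom_multiplicar_posicion v → Spec_multiplicar_posicion v (multiplicar_posicion v)

-- ===== LEMMAS AND PROOFS =====

theorem multiplicar_posicion_eq_map (v : List Int) :
    multiplicar_posicion v =
    (List.range v.length).map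
      (fun k => if k % 2 = 0 then v.getD k 0 * 2 else v.getD k 0 * 3) := by
  unfold multiplicar_posicion
  rw [PySem.List.pyRange_zero_natCast, List.foldl_map]
  rw [show (fun (result : List Int) (k : Nat) =>
        (fun result (i : Int) =>
          if PySem.Int.mod i 2 = 0 then result ++ [PySem.List.pyGetD v i 0 * 2]
          else result ++ [PySem.List.pyGetD v i 0 * 3]) result (k : Int))
      = fun result k => result ++
          [if k % 2 = 0 then v.getD k 0 * 2 else v.getD k 0 * 3] from ?_]
  · rw [PySem.List.foldl_append_singleton_eq_map]; simp
  · funext result k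
    have hmod : PySem.Int.mod (k : Int) 2 = ((k % 2 : Nat) : Int) := by
      simp
    simp only [hmod, PySem.List.pyGetD_natCast]
    by_cases h : k % 2 = 0
    · simp [h]
    · simp [h]; intro hd; omega

theorem go_spec (v : List Int) (i : Nat) (res : List Int) (hpar : i % 2 = 0) :
    multiplicar_posicion_alt_go v i res =
    res ++ (List.range' i (v.length - i)).map
      (fun k => if k % 2 = 0 then v.getD k 0 * 2 else v.getD k 0 * 3) := by
  rw [multiplicar_posicion_alt_go]
  by_cases h1 : i + 1 < v.length
  · have hrec := go_spec v (i + 2) (res ++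
      [PySem.List.pyGetD v (i : Int) 0 * 2, PySem.List.pyGetD v ((i : Nat) + 1 : Int) 0 * 3])
      (by omega)
    simp only [h1, if_pos]
    rw [hrec]
    have hr : List.range' i (v.length - i) =
        i :: (i + 1) :: List.range' (i + 2) (v.length - (i + 2)) := by
      have h2 : v.length - i = (v.length - (i + 2)) + 1 + 1 := by omega
      rw [h2, List.range'_succ, List.range'_succ]
    rw [hr]
    simp only [List.map_cons, PySem.List.pyGetD_natCast, List.append_assoc]
    have hi1 : (i + 1) % 2 ≠ 0 := by omega
    have hc : PySem.List.pyGetD v ((i : Int) + 1) 0 = v.getD (i + 1) 0 := by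
      rw [show ((i : Int) + 1) = (((i + 1 : Nat)) : Int) by push_cast; ring,
        PySem.List.pyGetD_natCast]
    simp [hpar, hi1, hc]
  · simp only [h1, if_neg, not_false_iff]
    by_cases h2 : i < v.length
    · have hn : v.length - i = 1 := by omega
      rw [hn, List.range'_succ]
      simp [h2, hpar, PySem.List.pyGetD_natCast]
    · have hn : v.length - i = 0 := by omega
      simp [h2, hn]
termination_by v.length - i
decreasing_by omega

theorem map_range_eq_alt (v : List Int) :
    (List.range v.length).map
      (fun k => if k % 2 = 0 then v.getD k 0 * 2 else v.getD k 0 * 3)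
    = multiplicar_posicion_alt v := by
  rw [multiplicar_posicion_alt, go_spec v 0 [] (by omega)]
  simp [List.range_eq_range']

-- ===== VERDICT (by name: the statement is the Claim_ definition above) =====
theorem multiplicar_posicion_spec : Claim_equal_multiplicar_posicion := by
  intro v _
  unfold Spec_multiplicar_posicion
  rw [multiplicar_posicion_eq_map, map_range_eq_alt]
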